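-- pv_equiv track=rewrite | github.com/Sewef/PTU-Data | py/pokeapi/apply_evo_move_rules.py | dedupe_tm_tutor
-- ===== SOURCE A (Python) =====
-- from typing import Any, Dict, List, Tuple
--
-- def dedupe_tm_tutor(tm_list: List[str]) -> List[str]:
--     keep = {}
--     out = []
--     for raw in tm_list or []:
--         n = str(raw).strip()
--         is_n = n.endswith(" (N)")
--         base = n[:-4].strip() if is_n else n
--         key = base.lower()
--         if key not in keep:
--             keep[key] = (base, is_n)
--         else:
--             b, had_n = keep[key]
--             if is_n and not had_n:
--                 keep[key] = (base, True)
--     for base, has_n in keep.values():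
--         out.append(base + (" (N)" if has_n else ""))
--     return out
-- ===== SOURCE B (Python) =====
-- from typing import List
--
-- def dedupe_tm_tutor(tm_list: List[str]) -> List[str]:
--     # group-then-reduce: one pass building key -> list of (base, is_n), then reduce each group
--     groups = {}
--     for raw in tm_list or []:
--         n = str(raw).strip()
--         is_n = n.endswith(" (N)")
--         base = n[:-4].strip() if is_n else n
--         groups.setdefault(base.lower(), []).append((base, is_n))
--     out = []
--     for occs in groups.values():
--         has_n = any(f for _, f in occs)
--         base = next((b for b, f in occs if f), occs[0][0])
--         out.append(base + (" (N)" if has_n else ""))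
--     return out
-- ===== Notes on version B (the rewrite author's own statement) =====
-- stated objective: alternative
-- what changed: A's single-pass fold that merges each occurrence into a per-key (base, flag) pair is restructured into a group-then-reduce: one pass builds an ordered dict mapping each lowercased key to the list of its normalized occurrences, then each group is reduced to any-(N) flag plus first-(N)-else-first base.
import Mathlib
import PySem

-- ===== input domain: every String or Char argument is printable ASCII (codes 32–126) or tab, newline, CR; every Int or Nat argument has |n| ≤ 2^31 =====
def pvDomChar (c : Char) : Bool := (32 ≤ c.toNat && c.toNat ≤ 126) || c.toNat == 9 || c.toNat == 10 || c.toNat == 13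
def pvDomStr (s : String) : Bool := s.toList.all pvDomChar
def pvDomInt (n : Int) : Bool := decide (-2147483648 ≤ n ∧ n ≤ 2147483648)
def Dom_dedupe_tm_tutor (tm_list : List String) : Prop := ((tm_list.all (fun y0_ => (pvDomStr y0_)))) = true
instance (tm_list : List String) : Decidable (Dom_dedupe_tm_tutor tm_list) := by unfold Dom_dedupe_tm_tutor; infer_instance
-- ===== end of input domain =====

-- B restructures A's single-pass merge into a group-then-reduce over a dict of occurrence lists (objective: alternative decomposition, same cost).

-- ===== PORT A =====
-- loop body of A's first 'for' (the Python's inline code, as a named helper)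
def pvStepA (keep : PySem.Dict String (String × Bool)) (raw : String) :
    PySem.Dict String (String × Bool) :=
  let n := PySem.Str.strip raw
  let is_n := PySem.Str.endswith n " (N)"
  let base := if is_n then PySem.Str.strip (PySem.Str.slice n none (some (-4))) else n
  let key := PySem.Str.lower base
  if keep.contains key = false then
    keep.insert key (base, is_n)
  else
    -- b, had_n = keep[key]  (key is present here, so getD's default is never used)
    if is_n && !(keep.getD key ("", false)).2 then keep.insert key (base, true) else keep

def dedupe_tm_tutor (tm_list : List String) : List String :=
  let keep := tm_list.foldl pvStepA PySem.Dict.empty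
  keep.values.map (fun p => p.1 ++ (if p.2 then " (N)" else ""))

-- ===== PORT B =====
-- loop body of B's grouping pass: groups.setdefault(key, []).append((base, is_n))
def pvStepB (groups : PySem.Dict String (List (String × Bool))) (raw : String) :
    PySem.Dict String (List (String × Bool)) :=
  let n := PySem.Str.strip raw
  let is_n := PySem.Str.endswith n " (N)"
  let base := if is_n then PySem.Str.strip (PySem.Str.slice n none (some (-4))) else n
  groups.modify (PySem.Str.lower base) [] (fun occs => occs ++ [(base, is_n)])

-- body of B's second loop: reduce one group of occurrences to its output string
def pvReduce (occs : List (String × Bool)) : String :=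
  let has_n := occs.any (fun p => p.2)
  -- next((b for b, f in occs if f), occs[0][0]); occs is never empty, headD's default is never used
  let base := match occs.filter (fun p => p.2) with
    | p :: _ => p.1
    | [] => (occs.headD ("", false)).1
  base ++ (if has_n then " (N)" else "")

def dedupe_tm_tutor_alt (tm_list : List String) : List String :=
  let groups := tm_list.foldl pvStepB PySem.Dict.empty
  groups.values.map pvReduce

-- ===== PRECONDITION & SPEC =====
def Spec_dedupe_tm_tutor (tm_list : List String) (out : List String) : Prop := out = dedupe_tm_tutor_alt tm_list
instance (tm_list : List String) (out : List String) : Decidable (Spec_dedupe_tm_tutor tm_list out) := by unfold Spec_dedupe_tm_tutor; infer_instance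

-- ===== CLAIM (what is proved, stated in full; the proofs are below) =====
def Claim_equal_dedupe_tm_tutor : Prop := ∀ (tm_list : List String), Dom_dedupe_tm_tutor tm_list → Spec_dedupe_tm_tutor tm_list (dedupe_tm_tutor tm_list)

-- ===== LEMMAS AND PROOFS =====

def pvBase (raw : String) : String :=
  let n := PySem.Str.strip raw
  if PySem.Str.endswith n " (N)" then PySem.Str.strip (PySem.Str.slice n none (some (-4))) else n

def pvIsN (raw : String) : Bool := PySem.Str.endswith (PySem.Str.strip raw) " (N)"

def pvKey (raw : String) : String := PySem.Str.lower (pvBase raw)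

-- the reduction of one group as a (base, flag) pair, and the rendering of such a pair
def pvRed (occs : List (String × Bool)) : String × Bool :=
  ((match occs.filter (fun p => p.2) with
    | p :: _ => p.1
    | [] => (occs.headD ("", false)).1),
   occs.any (fun p => p.2))

lemma pvStepA_eq (keep : PySem.Dict String (String × Bool)) (raw : String) :
    pvStepA keep raw =
      if keep.contains (pvKey raw) = false then keep.insert (pvKey raw) (pvBase raw, pvIsN raw)
      else if pvIsN raw && !(keep.getD (pvKey raw) ("", false)).2 then
        keep.insert (pvKey raw) (pvBase raw, true)
      else keep := by
  simp only [pvStepA, pvBase, pvIsN, pvKey]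

lemma pvStepB_eq (groups : PySem.Dict String (List (String × Bool))) (raw : String) :
    pvStepB groups raw =
      groups.insert (pvKey raw) ((groups.getD (pvKey raw) []) ++ [(pvBase raw, pvIsN raw)]) := by
  simp only [pvStepB, pvBase, pvIsN, pvKey, PySem.Dict.modify]

-- the simulation invariant between A's dict of pairs and B's dict of groups
def pvInv (dA : PySem.Dict String (String × Bool))
    (dB : PySem.Dict String (List (String × Bool))) : Prop :=
  dA.items = dB.items.map (fun p => (p.1, pvRed p.2)) ∧ dB.keys.Nodup ∧ ∀ p ∈ dB.items, p.2 ≠ []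

lemma pvRed_singleton (b : String) (f : Bool) : pvRed [(b, f)] = (b, f) := by
  cases f <;> simp [pvRed]

lemma pvRed_append (occs : List (String × Bool)) (hne : occs ≠ []) (b : String) (f : Bool) :
    pvRed (occs ++ [(b, f)]) =
      if f && !(pvRed occs).2 then (b, true) else pvRed occs := by
  rcases h : occs.any (fun p => p.2) with _ | _
  · -- no (N) occurrence yet
    obtain ⟨o, os, rfl⟩ := List.exists_cons_of_ne_nil hne
    have ho2 : o.2 = false := by simpa using List.any_eq_false.mp h o (by simp)
    have hosany : os.any (fun p => p.2) = false := by
      rw [List.any_eq_false] at h ⊢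
      intro p hp; exact h p (by simp [hp])
    have hfos : os.filter (fun p => p.2) = [] := by
      rw [List.filter_eq_nil_iff]
      intro p hp
      have := List.any_eq_false.mp hosany p hp
      simpa using this
    cases f <;> simp [pvRed, List.filter_append, ho2, hosany, hfos]
  · -- an (N) occurrence is already present: the filtered list is nonempty
    have hfil : occs.filter (fun p => p.2) ≠ [] := by
      rcases List.any_eq_true.mp h with ⟨p, hp, hp2⟩
      intro hc
      have := List.filter_eq_nil_iff.mp hc p hp
      simp [hp2] at this
    rcases hh : occs.filter (fun p => p.2) with _ | ⟨q, rest⟩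
    · exact absurd hh hfil
    · cases f <;> simp [pvRed, List.filter_append, List.any_append, h, hh]

lemma pv_items_unique {ν : Type} (d : PySem.Dict String ν) (hnd : d.keys.Nodup)
    {k : String} {v w : ν} (hv : (k, v) ∈ d.items) (hw : (k, w) ∈ d.items) : v = w := by
  have h1 := PySem.Dict.getD_of_mem_items d hv hnd v
  have h2 := PySem.Dict.getD_of_mem_items d hw hnd v
  rw [h1] at h2; exact h2

lemma pvInv_step' (dA : PySem.Dict String (String × Bool))
    (dB : PySem.Dict String (List (String × Bool))) (key base : String) (is_n : Bool)
    (h : pvInv dA dB) :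
    pvInv (if dA.contains key = false then dA.insert key (base, is_n)
           else if is_n && !(dA.getD key ("", false)).2 then dA.insert key (base, true) else dA)
          (dB.insert key ((dB.getD key []) ++ [(base, is_n)])) := by
  obtain ⟨hitems, hnd, hne⟩ := h
  have hkeys : dA.keys = dB.keys := by
    simp only [PySem.Dict.keys, hitems, List.map_map]
    rfl
  by_cases hc : dB.contains key = true
  · -- the key is already present in both dicts
    have hcA : dA.contains key = true := by
      rw [PySem.Dict.contains_eq_decide_mem_keys] at hc ⊢
      rw [hkeys]; exact hc
    have hkmem : key ∈ dB.keys := (PySem.Dict.contains_iff_mem_keys dB key).mp hc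
    obtain ⟨p, hp, hp1⟩ := List.mem_map.mp hkmem
    obtain ⟨occs, hocc⟩ : ∃ occs, (key, occs) ∈ dB.items := ⟨p.2, by rwa [← hp1]⟩
    have hoccne : occs ≠ [] := hne _ hocc
    have hgetB : dB.getD key [] = occs := PySem.Dict.getD_of_mem_items dB hocc hnd []
    have hndA : dA.keys.Nodup := by rw [hkeys]; exact hnd
    have hAmem : (key, pvRed occs) ∈ dA.items := by
      rw [hitems]; exact List.mem_map.mpr ⟨(key, occs), hocc, rfl⟩
    have hgetA : dA.getD key ("", false) = pvRed occs :=
      PySem.Dict.getD_of_mem_items dA hAmem hndA _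
    have hitemsB : (dB.insert key ((dB.getD key []) ++ [(base, is_n)])).items =
        dB.items.map (fun q => if (q.1 == key) = true then (key, occs ++ [(base, is_n)]) else q) := by
      rw [hgetB, PySem.Dict.items_insert_of_contains dB _ hc]
    have hval : ∀ q ∈ dB.items, q.1 = key → q.2 = occs := by
      intro q hq hq1
      exact pv_items_unique dB hnd (hq1 ▸ hq) hocc
    refine ⟨?_, ?_, ?_⟩
    · -- items stay in simulation
      rw [if_neg (by simp [hcA]), hitemsB, List.map_map, hgetA]
      by_cases hup : (is_n && !(pvRed occs).2) = true
      · rw [if_pos hup, PySem.Dict.items_insert_of_contains dA _ hcA, hitems, List.map_map]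
        apply List.map_congr_left
        intro q hq
        by_cases hq1 : q.1 = key
        · have hq2 := hval q hq hq1
          simp [Function.comp, hq1, pvRed_append occs hoccne base is_n, hup]
        · simp [Function.comp, hq1]
      · rw [if_neg hup, hitems]
        apply List.map_congr_left
        intro q hq
        by_cases hq1 : q.1 = key
        · have hq2 := hval q hq hq1
          have hup' : (is_n && !(pvRed occs).2) = false := by simpa using hup
          simp [Function.comp, hq1, hq2, pvRed_append occs hoccne base is_n, hup']
        · simp [Function.comp, hq1]
    · -- keys stay nodup
      rw [hgetB, PySem.Dict.keys_insert_of_contains dB _ hc]; exact hnd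
    · -- groups stay nonempty
      intro q hq
      rw [hitemsB] at hq
      obtain ⟨r, hr, rfl⟩ := List.mem_map.mp hq
      by_cases hr1 : r.1 = key
      · simp [hr1]
      · rw [if_neg (by simp [hr1])]
        exact hne _ hr
  · -- fresh key: both dicts append a new entry
    have hcB : dB.contains key = false := by simpa using hc
    have hcA : dA.contains key = false := by
      rw [PySem.Dict.contains_eq_decide_mem_keys] at hcB ⊢
      rw [hkeys]; exact hcB
    have hgB : dB.getD key [] = [] := PySem.Dict.getD_of_not_contains dB [] hcB
    refine ⟨?_, ?_, ?_⟩
    · rw [if_pos (by simp [hcA]), hgB, PySem.Dict.items_insert_of_not_contains dA _ hcA,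
        PySem.Dict.items_insert_of_not_contains dB _ hcB]
      simp [hitems, pvRed_singleton]
    · rw [hgB, PySem.Dict.keys_insert_of_not_contains dB _ hcB]
      refine List.Nodup.append hnd (List.nodup_singleton key) ?_
      intro x hx hx'
      have hxk : x = key := by simpa using hx'
      exact absurd ((PySem.Dict.contains_iff_mem_keys dB key).mpr (hxk ▸ hx)) (by simp [hcB])
    · intro q hq
      rw [hgB, PySem.Dict.items_insert_of_not_contains dB _ hcB] at hq
      rcases List.mem_append.mp hq with hq | hq
      · exact hne _ hq
      · simp only [List.mem_singleton] at hq; subst hq; simp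

lemma pvInv_step (dA : PySem.Dict String (String × Bool))
    (dB : PySem.Dict String (List (String × Bool))) (raw : String)
    (h : pvInv dA dB) : pvInv (pvStepA dA raw) (pvStepB dB raw) := by
  rw [pvStepA_eq, pvStepB_eq]
  exact pvInv_step' dA dB (pvKey raw) (pvBase raw) (pvIsN raw) h

lemma pvInv_foldl (l : List String) (dA : PySem.Dict String (String × Bool))
    (dB : PySem.Dict String (List (String × Bool))) (h : pvInv dA dB) :
    pvInv (l.foldl pvStepA dA) (l.foldl pvStepB dB) := by
  induction l generalizing dA dB with
  | nil => exact h
  | cons x xs ih => exact ih _ _ (pvInv_step dA dB x h)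

-- ===== VERDICT (by name: the statement is the Claim_ definition above) =====
theorem dedupe_tm_tutor_spec : Claim_equal_dedupe_tm_tutor := by
  intro l _
  show dedupe_tm_tutor l = dedupe_tm_tutor_alt l
  obtain ⟨hitems, -, -⟩ :=
    pvInv_foldl l PySem.Dict.empty PySem.Dict.empty ⟨rfl, List.nodup_nil, by simp [PySem.Dict.empty]⟩
  show (l.foldl pvStepA PySem.Dict.empty).values.map (fun p => p.1 ++ (if p.2 then " (N)" else ""))
      = (l.foldl pvStepB PySem.Dict.empty).values.map pvReduce
  simp only [PySem.Dict.values, hitems, List.map_map]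
  rfl
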